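-- pv_equiv track=rewrite | github.com/miliar/Code_Jam_Webscraper | solutions_python/Problem_200/2785.py | chkl
-- ===== SOURCE A (Python) =====
-- def chkl(x):
-- 	x=str(x)
-- 	x1=[]
-- 	for i in range(0,len(x)):
-- 	   	x1.append(int(x[i]))
-- 	x1=sorted(x1)
-- 	x2=0
-- 	for j in range(0,len(x)):
-- 		x2=10*x2+x1[j]
-- 	return bool(str(x2)==x)
-- ===== SOURCE B (Python) =====
-- def chkl(x):
--     s = str(x)
--     return all(int(s[i]) <= int(s[i + 1]) for i in range(len(s) - 1))
-- ===== Notes on version B (the rewrite author's own statement) =====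
-- stated objective: simpler
-- what changed: B replaces the sort-digits/rebuild-number/string-compare pipeline by a single forward pass comparing each adjacent pair of digit characters.
import Mathlib
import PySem

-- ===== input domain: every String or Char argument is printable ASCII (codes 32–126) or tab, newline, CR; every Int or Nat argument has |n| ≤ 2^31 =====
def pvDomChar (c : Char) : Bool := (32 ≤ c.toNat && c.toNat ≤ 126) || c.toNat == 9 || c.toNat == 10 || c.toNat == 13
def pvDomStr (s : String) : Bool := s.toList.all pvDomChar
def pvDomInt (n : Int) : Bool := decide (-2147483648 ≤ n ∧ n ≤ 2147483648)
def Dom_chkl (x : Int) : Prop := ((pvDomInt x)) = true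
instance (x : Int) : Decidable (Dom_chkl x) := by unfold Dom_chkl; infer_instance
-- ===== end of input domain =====

-- B replaces A's sort-digits/rebuild-number/string-compare pipeline by a single adjacent-pair
-- pass over the digit characters (objective: simpler); values agree on all nonnegative inputs.

-- ===== PORT A =====
-- int(c) for a single character c (ValueError cases are outside Pre_; 0 is a dummy default)
def pvDigitVal (c : Char) : Int := (PySem.Int.ofChars? [c]).getD 0

def chkl (x : Int) : Bool :=
  -- x = str(x)   (kept as its character list, per the PySem convention)
  let s : List Char := (PySem.Int.toStr x).toList
  -- x1 = []; for i in range(0, len(x)): x1.append(int(x[i]))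
  let x1 : List Int :=
    (PySem.List.pyRange 0 (PySem.List.len s)).foldl
      (fun acc i => acc ++ [pvDigitVal (PySem.List.pyGetD s i ' ')]) []
  -- x1 = sorted(x1)
  let x1s : List Int := PySem.List.sorted x1 id
  -- x2 = 0; for j in range(0, len(x)): x2 = 10*x2 + x1[j]
  let x2 : Int :=
    (PySem.List.pyRange 0 (PySem.List.len s)).foldl
      (fun acc j => 10 * acc + PySem.List.pyGetD x1s j 0) 0
  -- return bool(str(x2) == x)
  PySem.Int.toChars x2 == s

-- ===== PORT B =====
def chkl_alt (x : Int) : Bool :=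
  -- s = str(x)
  let s : List Char := (PySem.Int.toStr x).toList
  -- all(int(s[i]) <= int(s[i+1]) for i in range(len(s)-1))
  (PySem.List.pyRange 0 (PySem.List.len s - 1)).all
    (fun i => decide (pvDigitVal (PySem.List.pyGetD s i ' ')
                    ≤ pvDigitVal (PySem.List.pyGetD s (i + 1) ' ')))

-- ===== PRECONDITION & SPEC =====
-- A raises ValueError on negative inputs (int('-') hits the sign character); Pre_ keeps the nonnegative ones.
def Pre_chkl (x : Int) : Prop := 0 ≤ x
instance (x : Int) : Decidable (Pre_chkl x) := by unfold Pre_chkl; infer_instance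

def pvWitness_chkl : Int := (1234)

def Spec_chkl (x : Int) (out : Bool) : Prop := out = chkl_alt x
instance (x : Int) (out : Bool) : Decidable (Spec_chkl x out) := by unfold Spec_chkl; infer_instance

-- ===== CLAIM (what is proved, stated in full; the proofs are below) =====
def Claim_equal_chkl : Prop := ∀ (x : Int), Dom_chkl x → Pre_chkl x → Spec_chkl x (chkl x)

-- ===== LEMMAS AND PROOFS =====

-- the big-endian rebuild loop  x2 = 10*x2 + d
def pvRebuild (l : List Int) : Int := l.foldl (fun a d => 10 * a + d) 0

theorem pvRebuild_shift (l : List Int) (a : Int) :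
    l.foldl (fun a d => 10 * a + d) a = a * 10 ^ l.length + pvRebuild l := by
  induction l generalizing a with
  | nil => simp [pvRebuild]
  | cons x t ih =>
    simp only [List.foldl_cons, List.length_cons, pvRebuild]
    rw [ih (10 * a + x), ih (10 * 0 + x)]
    ring

theorem pvRebuild_cons (x : Int) (t : List Int) :
    pvRebuild (x :: t) = x * 10 ^ t.length + pvRebuild t := by
  simp only [pvRebuild, List.foldl_cons]
  simpa using pvRebuild_shift t (10 * 0 + x)

theorem pvRebuild_bounds (l : List Int) (h : ∀ d ∈ l, 0 ≤ d ∧ d < 10) :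
    0 ≤ pvRebuild l ∧ pvRebuild l < 10 ^ l.length := by
  induction l with
  | nil => simp [pvRebuild]
  | cons x t ih =>
    have hx := h x (by simp)
    have ht := ih (fun d hd => h d (by simp [hd]))
    rw [pvRebuild_cons, List.length_cons]
    have hp : (0:Int) < 10 ^ t.length := by positivity
    constructor
    · nlinarith [hx.1, ht.1]
    · rw [pow_succ]
      nlinarith [hx.2, ht.2, ht.1]

theorem pvRebuild_inj (l1 l2 : List Int) (h1 : ∀ d ∈ l1, 0 ≤ d ∧ d < 10)
    (h2 : ∀ d ∈ l2, 0 ≤ d ∧ d < 10) (hlen : l1.length = l2.length)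
    (h : pvRebuild l1 = pvRebuild l2) : l1 = l2 := by
  induction l1 generalizing l2 with
  | nil => cases l2 with
    | nil => rfl
    | cons _ _ => simp at hlen
  | cons x t ih =>
    cases l2 with
    | nil => simp at hlen
    | cons y u =>
      have hlen' : t.length = u.length := by simpa using hlen
      rw [pvRebuild_cons, pvRebuild_cons, hlen'] at h
      have hx := h1 x (by simp)
      have hy := h2 y (by simp)
      have hbt := pvRebuild_bounds t (fun d hd => h1 d (by simp [hd]))
      have hbu := pvRebuild_bounds u (fun d hd => h2 d (by simp [hd]))
      rw [hlen'] at hbt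
      have hp : (0:Int) < 10 ^ u.length := by positivity
      have hxy : x = y := by nlinarith [hbt.1, hbt.2, hbu.1, hbu.2, hx.1, hx.2, hy.1, hy.2]
      subst hxy
      have htu : pvRebuild t = pvRebuild u := by nlinarith
      rw [ih u (fun d hd => h1 d (by simp [hd])) (fun d hd => h2 d (by simp [hd])) hlen' htu]

-- core's Nat.toDigits in terms of Mathlib's Nat.digits
theorem pvToDigitsCore_eq (f : Nat) : ∀ (n : Nat) (ds : List Char), n < f →
    Nat.toDigitsCore 10 f n ds =
      (if n = 0 then ['0'] else ((Nat.digits 10 n).map Nat.digitChar).reverse) ++ ds := by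
  induction f with
  | zero => intro n ds h; omega
  | succ g ih =>
    intro n ds h
    rw [Nat.toDigitsCore]
    by_cases h0 : n = 0
    · subst h0; simp; decide
    by_cases h1 : n / 10 = 0
    · have hn : n < 10 := by omega
      have hd : Nat.digits 10 n = [n] := by
        rw [Nat.digits_def' (by norm_num : (1:Nat) < 10) (by omega)]
        simp [h1, Nat.mod_eq_of_lt hn]
      simp [h1, h0, hd, Nat.mod_eq_of_lt hn]
    · have hlt : n / 10 < g := by
        have := Nat.div_lt_self (by omega : 0 < n) (by norm_num : 1 < 10)
        omega
      have hd : Nat.digits 10 n = n % 10 :: Nat.digits 10 (n / 10) :=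
        Nat.digits_def' (by norm_num : (1:Nat) < 10) (by omega)
      simp only [h1, ite_false]
      rw [ih (n / 10) _ hlt, if_neg h1, hd, if_neg h0]
      simp

theorem pvToDigits_eq (m : Nat) :
    Nat.toDigits 10 m =
      if m = 0 then ['0'] else ((Nat.digits 10 m).map Nat.digitChar).reverse := by
  rw [Nat.toDigits, pvToDigitsCore_eq (m+1) m [] (by omega)]
  simp

theorem pvDigitVal_digitChar (d : Nat) (hd : d < 10) :
    pvDigitVal (Nat.digitChar d) = (d : Int) := by
  interval_cases d <;> decide

-- digit values of str(m)
def pvDs (m : Nat) : List Int := (Nat.toDigits 10 m).map pvDigitVal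

theorem pvDs_eq (m : Nat) :
    pvDs m = if m = 0 then [0] else ((Nat.digits 10 m).map Int.ofNat).reverse := by
  unfold pvDs
  rw [pvToDigits_eq]
  by_cases h0 : m = 0
  · simp [h0]; decide
  · rw [if_neg h0, if_neg h0, List.map_reverse, List.map_map]
    congr 1
    apply List.map_congr_left
    intro d hd
    exact pvDigitVal_digitChar d (Nat.digits_lt_base (by norm_num) hd)

theorem pvDs_bounds (m : Nat) : ∀ d ∈ pvDs m, 0 ≤ d ∧ d < 10 := by
  intro d hd
  rw [pvDs_eq] at hd
  by_cases h0 : m = 0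
  · simp [h0] at hd; omega
  · rw [if_neg h0, List.mem_reverse] at hd
    obtain ⟨k, hk, rfl⟩ := List.mem_map.1 hd
    have := Nat.digits_lt_base (by norm_num : (1:Nat) < 10) hk
    simp only [Int.ofNat_eq_natCast]
    omega

theorem pvRebuild_rev_nat (l : List Nat) :
    pvRebuild ((l.map Int.ofNat).reverse) = Nat.ofDigits (10 : Int) l := by
  induction l with
  | nil => simp [pvRebuild]; exact Int.neg_inj.mp rfl
  | cons x t ih =>
    simp only [List.map_cons, List.reverse_cons]
    show List.foldl (fun a d => 10 * a + d) 0 ((t.map Int.ofNat).reverse ++ [Int.ofNat x]) = _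
    rw [List.foldl_append]
    simp only [List.foldl_cons, List.foldl_nil]
    show 10 * pvRebuild ((t.map Int.ofNat).reverse) + Int.ofNat x = _
    rw [ih, show Nat.ofDigits (10:Int) (x :: t) = (x:Int) + 10 * Nat.ofDigits (10:Int) t from rfl,
        Int.ofNat_eq_natCast]
    ring

theorem pvRebuild_pvDs (m : Nat) : pvRebuild (pvDs m) = (m : Int) := by
  rw [pvDs_eq]
  by_cases h0 : m = 0
  · simp [h0, pvRebuild]
  · rw [if_neg h0, pvRebuild_rev_nat]
    rw [show ((10:Int) = ((10:Nat):Int)) from rfl, ← Nat.coe_ofDigits, Nat.ofDigits_digits]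

theorem pvToDigits_inj (m1 m2 : Nat) (h : Nat.toDigits 10 m1 = Nat.toDigits 10 m2) :
    m1 = m2 := by
  have h1 := pvRebuild_pvDs m1
  have h2 := pvRebuild_pvDs m2
  unfold pvDs at h1 h2
  rw [h, h2] at h1
  exact_mod_cast h1.symm

-- A-side reduction: chkl x compares str(rebuild(sorted digit values)) with str(x)
theorem pvChkl_A (x : Int) :
    chkl x = (PySem.Int.toChars
        (pvRebuild (PySem.List.sorted ((PySem.Int.toStr x).toList.map pvDigitVal) id))
      == (PySem.Int.toStr x).toList) := by
  simp only [chkl]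
  have h1 : (PySem.List.pyRange 0 (PySem.List.len (PySem.Int.toStr x).toList)).foldl
      (fun acc i => acc ++ [pvDigitVal (PySem.List.pyGetD (PySem.Int.toStr x).toList i ' ')]) []
      = (PySem.Int.toStr x).toList.map pvDigitVal := by
    rw [PySem.List.foldl_append_singleton_eq_map
      (fun i => pvDigitVal (PySem.List.pyGetD (PySem.Int.toStr x).toList i ' ')), List.nil_append]
    rw [show (fun i => pvDigitVal (PySem.List.pyGetD (PySem.Int.toStr x).toList i ' '))
        = pvDigitVal ∘ (fun j => PySem.List.pyGetD (PySem.Int.toStr x).toList j ' ') from rfl]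
    rw [← List.map_map, PySem.List.map_pyGetD_pyRange_zero]
  rw [h1]
  have hlen : PySem.List.len (PySem.Int.toStr x).toList
      = PySem.List.len (PySem.List.sorted ((PySem.Int.toStr x).toList.map pvDigitVal) id) := by
    simp [PySem.List.len_eq, PySem.List.length_sorted]
  rw [hlen, PySem.List.foldl_pyRange_zero_pyGetD
    (PySem.List.sorted ((PySem.Int.toStr x).toList.map pvDigitVal) id) 0
    (fun a d => 10 * a + d) 0]
  rfl

-- B-side reduction: chkl_alt is the adjacent-pair (pairwise) test on the digit values
theorem pvChkl_B (x : Int) :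
    chkl_alt x = true ↔ ((PySem.Int.toStr x).toList.map pvDigitVal).Pairwise (· ≤ ·) := by
  unfold chkl_alt
  rw [List.all_eq_true]
  rw [← List.isChain_iff_pairwise, List.isChain_iff_getElem]
  constructor
  · intro h k hk
    have hk' : k + 1 < (PySem.Int.toStr x).toList.length := by
      simpa using hk
    have hmem : (k : Int) ∈ PySem.List.pyRange 0 (PySem.List.len (PySem.Int.toStr x).toList - 1) := by
      rw [PySem.List.mem_pyRange_one, PySem.List.len_eq]
      omega
    have := h _ hmem
    rw [decide_eq_true_iff] at this
    have e1 : PySem.List.pyGetD (PySem.Int.toStr x).toList (k : Int) ' '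
        = (PySem.Int.toStr x).toList[k] := by
      rw [PySem.List.pyGetD_natCast, List.getD_eq_getElem _ _ (by omega)]
    have e2 : PySem.List.pyGetD (PySem.Int.toStr x).toList ((k : Int) + 1) ' '
        = (PySem.Int.toStr x).toList[k + 1] := by
      rw [show ((k : Int) + 1) = ((k + 1 : Nat) : Int) by push_cast; ring,
          PySem.List.pyGetD_natCast, List.getD_eq_getElem _ _ hk']
    rw [e1, e2] at this
    simpa using this
  · intro h i hi
    rw [PySem.List.mem_pyRange_one, PySem.List.len_eq] at hi
    set k : Nat := i.toNat with hkdef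
    have hik : i = (k : Int) := by omega
    have hk' : k + 1 < (PySem.Int.toStr x).toList.length := by omega
    have := h k (by simpa using hk')
    rw [decide_eq_true_iff, hik]
    have e1 : PySem.List.pyGetD (PySem.Int.toStr x).toList (k : Int) ' '
        = (PySem.Int.toStr x).toList[k] := by
      rw [PySem.List.pyGetD_natCast, List.getD_eq_getElem _ _ (by omega)]
    have e2 : PySem.List.pyGetD (PySem.Int.toStr x).toList ((k : Int) + 1) ' '
        = (PySem.Int.toStr x).toList[k + 1] := by
      rw [show ((k : Int) + 1) = ((k + 1 : Nat) : Int) by push_cast; ring,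
          PySem.List.pyGetD_natCast, List.getD_eq_getElem _ _ hk']
    rw [e1, e2]
    simpa using this

theorem pvChkl_eq (x : Int) (hx : 0 ≤ x) : chkl x = chkl_alt x := by
  have hs : (PySem.Int.toStr x).toList = Nat.toDigits 10 x.toNat := by
    rw [PySem.Int.toList_toStr, PySem.Int.toChars, if_neg (by omega)]
  have hds : (PySem.Int.toStr x).toList.map pvDigitVal = pvDs x.toNat := by
    rw [hs]; rfl
  set m := x.toNat with hm
  set sds := PySem.List.sorted (pvDs m) id with hsds
  have hsb : ∀ d ∈ sds, 0 ≤ d ∧ d < 10 := by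
    intro d hd
    exact pvDs_bounds m d ((PySem.List.mem_sorted _ _ _ _).1 hd)
  have hx2 := pvRebuild_bounds sds hsb
  rw [Bool.eq_iff_iff]
  rw [pvChkl_B]
  rw [hds]
  rw [pvChkl_A, hds, hs]
  rw [beq_iff_eq]
  rw [show PySem.Int.toChars (pvRebuild sds)
      = Nat.toDigits 10 (pvRebuild sds).toNat by
    rw [PySem.Int.toChars, if_neg (by omega)]]
  constructor
  · intro h
    -- equal strings ⇒ equal numbers ⇒ sorted digits = digits ⇒ pairwise
    have hnum : (pvRebuild sds).toNat = m := pvToDigits_inj _ _ h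
    have hval : pvRebuild sds = pvRebuild (pvDs m) := by
      rw [pvRebuild_pvDs, ← hnum, Int.toNat_of_nonneg hx2.1]
    have hlist : sds = pvDs m := by
      refine pvRebuild_inj _ _ hsb (pvDs_bounds m) ?_ hval
      simp [hsds, PySem.List.length_sorted]
    rw [← hlist]
    simpa using PySem.List.sorted_pairwise (pvDs m) id
  · intro h
    -- pairwise ⇒ sorting is the identity ⇒ the rebuilt number is x itself
    have hlist : sds = pvDs m := by
      rw [hsds]
      exact PySem.List.sorted_eq_self_of_pairwise (pvDs m) id (by simpa using h)
    rw [hlist, pvRebuild_pvDs]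
    simp

-- ===== VERDICT (by name: the statement is the Claim_ definition above) =====
theorem chkl_spec : Claim_equal_chkl := by
  intro x _ hpre
  unfold Spec_chkl
  exact pvChkl_eq x hpre
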